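-- pv_equiv track=rewrite | github.com/XIAOMANSDK/B6x | xm_b6_mcp/src/core/call_chain_extractor.py | suggest_init_order
-- ===== SOURCE A (Python) =====
-- from typing import Dict, List, Optional, Set, Tuple, Any
--
-- def suggest_init_order(init_sequence: List[str]) -> List[str]:
--     """
--     Suggest proper initialization order based on dependencies.
--
--     Args:
--         init_sequence: Current initialization sequence
--
--     Returns:
--         Reordered init sequence
--     """
--     # Define dependency groups (higher number = later in sequence)
--     priority_groups = {
--         1: ['System', 'Core', 'CLOCK', 'RCC'],
--         2: ['Power', 'LDO', 'Reset'],
--         3: ['GPIO', 'Pin'],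
--         4: ['DMA', 'IRQ', 'NVIC'],
--         5: ['UART', 'SPI', 'I2C', 'I2S'],
--         6: ['ADC', 'DAC', 'Timer'],
--         7: ['BLE', 'Radio'],
--     }
--
--     def get_priority(api: str):
--         """Get priority for an API."""
--         for priority, keywords in priority_groups.items():
--             if any(kw in api for kw in keywords):
--                 return priority
--         return 4  # Default priority
--
--     # Sort by priority
--     return sorted(init_sequence, key=get_priority)
-- ===== SOURCE B (Python) =====
-- from typing import List
--
--
-- def suggest_init_order(init_sequence: List[str]) -> List[str]:
--     """Seven staged filter passes; priority = min matching entry of a flat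
--     keyword->priority table (the table is listed in ascending priority, so the
--     minimum equals the first matching group of the original grouped lookup)."""
--     keyword_priority = [
--         ("System", 1), ("Core", 1), ("CLOCK", 1), ("RCC", 1),
--         ("Power", 2), ("LDO", 2), ("Reset", 2),
--         ("GPIO", 3), ("Pin", 3),
--         ("DMA", 4), ("IRQ", 4), ("NVIC", 4),
--         ("UART", 5), ("SPI", 5), ("I2C", 5), ("I2S", 5),
--         ("ADC", 6), ("DAC", 6), ("Timer", 6),
--         ("BLE", 7), ("Radio", 7),
--     ]
--
--     def prio(api):
--         hits = [p for kw, p in keyword_priority if kw in api]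
--         return min(hits) if hits else 4
--
--     out = []
--     for p in range(1, 8):
--         out += [x for x in init_sequence if prio(x) == p]
--     return out
-- ===== Notes on version B (the rewrite author's own statement) =====
-- stated objective: alternative
-- what changed: Replaces sorted(init_sequence, key=get_priority) and the grouped first-match priority dict with seven staged filter passes over the input (one per priority 1..7), and computes each API's priority as the minimum over a flat keyword->priority table instead of A's first-matching-group loop.
import Mathlib
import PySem

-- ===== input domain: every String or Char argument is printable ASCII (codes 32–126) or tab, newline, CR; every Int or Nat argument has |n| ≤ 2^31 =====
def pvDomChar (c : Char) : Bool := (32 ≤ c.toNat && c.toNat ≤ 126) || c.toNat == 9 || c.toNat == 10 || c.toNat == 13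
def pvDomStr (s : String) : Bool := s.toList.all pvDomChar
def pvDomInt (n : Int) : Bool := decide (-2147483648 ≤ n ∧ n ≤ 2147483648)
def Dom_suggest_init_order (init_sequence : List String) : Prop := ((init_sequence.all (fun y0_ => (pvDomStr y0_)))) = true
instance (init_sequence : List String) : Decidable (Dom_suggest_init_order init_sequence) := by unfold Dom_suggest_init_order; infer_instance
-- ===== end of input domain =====

-- B replaces A's stable sort with seven staged filter passes and A's grouped first-match
-- priority lookup with a min over a flat keyword->priority table (alternative algorithm).

-- ===== PORT A =====
def pvPriorityGroupsA : PySem.Dict Int (List String) :=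
  PySem.Dict.ofList [(1, ["System", "Core", "CLOCK", "RCC"]),
                     (2, ["Power", "LDO", "Reset"]),
                     (3, ["GPIO", "Pin"]),
                     (4, ["DMA", "IRQ", "NVIC"]),
                     (5, ["UART", "SPI", "I2C", "I2S"]),
                     (6, ["ADC", "DAC", "Timer"]),
                     (7, ["BLE", "Radio"])]

-- 'for priority, keywords in priority_groups.items(): if any(kw in api …): return priority' default 4
def pvGetPriorityLoopA : List (Int × List String) → String → Int
  | [], _ => 4
  | (priority, keywords) :: rest, api =>
      if keywords.any (fun kw => PySem.Str.isIn kw api) then priority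
      else pvGetPriorityLoopA rest api

def pvGetPriorityA (api : String) : Int := pvGetPriorityLoopA pvPriorityGroupsA.items api

def suggest_init_order (init_sequence : List String) : List String :=
  PySem.List.sorted init_sequence pvGetPriorityA false

-- ===== PORT B =====
def pvKeywordPriority : List (String × Int) :=
  [("System", 1), ("Core", 1), ("CLOCK", 1), ("RCC", 1),
   ("Power", 2), ("LDO", 2), ("Reset", 2),
   ("GPIO", 3), ("Pin", 3),
   ("DMA", 4), ("IRQ", 4), ("NVIC", 4),
   ("UART", 5), ("SPI", 5), ("I2C", 5), ("I2S", 5),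
   ("ADC", 6), ("DAC", 6), ("Timer", 6),
   ("BLE", 7), ("Radio", 7)]

-- hits = [p for kw, p in keyword_priority if kw in api]; min(hits) if hits else 4
-- (min? = none exactly when hits == [], so the match is Python's conditional)
def pvPrioB (api : String) : Int :=
  let hits := (pvKeywordPriority.filter (fun kp => PySem.Str.isIn kp.1 api)).map Prod.snd
  match PySem.List.min? hits (fun x => x) with
  | none => 4
  | some m => m

-- out = []; for p in range(1, 8): out += [x for x in init_sequence if prio(x) == p]
def suggest_init_order_alt (init_sequence : List String) : List String :=
  (PySem.List.pyRange 1 8 1).foldl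
    (fun out p => out ++ init_sequence.filter (fun x => pvPrioB x == p)) []

-- ===== PRECONDITION & SPEC =====
def Spec_suggest_init_order (init_sequence : List String) (out : List String) : Prop := out = suggest_init_order_alt init_sequence
instance (init_sequence : List String) (out : List String) : Decidable (Spec_suggest_init_order init_sequence out) := by unfold Spec_suggest_init_order; infer_instance

-- ===== CLAIM (what is proved, stated in full; the proofs are below) =====
def Claim_equal_suggest_init_order : Prop := ∀ (init_sequence : List String), Dom_suggest_init_order init_sequence → Spec_suggest_init_order init_sequence (suggest_init_order init_sequence)

-- ===== LEMMAS AND PROOFS =====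

-- proof-only grouped view shared by both key characterisations
def pvGroups : List (Int × List String) :=
  [(1, ["System", "Core", "CLOCK", "RCC"]),
   (2, ["Power", "LDO", "Reset"]),
   (3, ["GPIO", "Pin"]),
   (4, ["DMA", "IRQ", "NVIC"]),
   (5, ["UART", "SPI", "I2C", "I2S"]),
   (6, ["ADC", "DAC", "Timer"]),
   (7, ["BLE", "Radio"])]

def pvHitsOf (groups : List (Int × List String)) (api : String) : List Int :=
  groups.flatMap (fun g => (g.2.filter (fun kw => PySem.Str.isIn kw api)).map (fun _ => g.1))

theorem pvItemsA : pvPriorityGroupsA.items = pvGroups := rfl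

theorem pvFlat : pvKeywordPriority = pvGroups.flatMap (fun g => g.2.map (fun kw => (kw, g.1))) := rfl

theorem pvHitsB (api : String) :
    (pvKeywordPriority.filter (fun kp => PySem.Str.isIn kp.1 api)).map Prod.snd
      = pvHitsOf pvGroups api := by
  rw [pvFlat]
  unfold pvHitsOf
  rw [List.filter_flatMap, List.map_flatMap]
  apply List.flatMap_congr
  intro g _
  rw [List.filter_map, List.map_map]
  rfl

theorem pvMem_hitsOf (groups : List (Int × List String)) (api : String) (y : Int) :
    y ∈ pvHitsOf groups api
      ↔ ∃ g ∈ groups, y = g.1 ∧ ∃ kw ∈ g.2, PySem.Str.isIn kw api = true := by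
  unfold pvHitsOf
  simp only [List.mem_flatMap, List.mem_map, List.mem_filter]
  constructor
  · rintro ⟨g, hg, kw, ⟨hkw, hin⟩, rfl⟩
    exact ⟨g, hg, rfl, kw, hkw, hin⟩
  · rintro ⟨g, hg, rfl, kw, hkw, hin⟩
    exact ⟨g, hg, kw, ⟨hkw, hin⟩, rfl⟩

-- A's first-matching-group loop equals min-with-default-4 over the flat hits,
-- given that the group priorities are strictly increasing
theorem pvLoop_eq_min (api : String) :
    ∀ groups : List (Int × List String), (groups.map Prod.fst).Pairwise (· < ·) →
      pvGetPriorityLoopA groups api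
        = (match PySem.List.min? (pvHitsOf groups api) (fun x => x) with
           | none => 4
           | some m => m) := by
  intro groups
  induction groups with
  | nil => intro _; rfl
  | cons g rest ih =>
      intro hpw
      obtain ⟨p, kws⟩ := g
      have hpw2 : (p :: rest.map Prod.fst).Pairwise (· < ·) := by simpa using hpw
      have hlt : ∀ g' ∈ rest, p < g'.1 := by
        intro g' hg'
        exact (List.pairwise_cons.mp hpw2).1 g'.1 (List.mem_map_of_mem hg')
      have hpw' : (rest.map Prod.fst).Pairwise (· < ·) := (List.pairwise_cons.mp hpw2).2
      simp only [pvGetPriorityLoopA]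
      by_cases hany : kws.any (fun kw => PySem.Str.isIn kw api) = true
      · rw [if_pos hany]
        -- hits contain p and every element is ≥ p, so min = p
        obtain ⟨kw, hkw, hin⟩ := List.any_eq_true.mp hany
        have hpmem : p ∈ pvHitsOf ((p, kws) :: rest) api :=
          (pvMem_hitsOf _ _ _).mpr ⟨(p, kws), by simp, rfl, kw, hkw, hin⟩
        have hge : ∀ y ∈ pvHitsOf ((p, kws) :: rest) api, p ≤ y := by
          intro y hy
          obtain ⟨g', hg', rfl, _⟩ := (pvMem_hitsOf _ _ _).mp hy
          rcases List.mem_cons.mp hg' with h | h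
          · rw [h]
          · exact le_of_lt (hlt g' h)
        obtain ⟨m, hm⟩ : ∃ m, PySem.List.min? (pvHitsOf ((p, kws) :: rest) api) (fun x => x) = some m := by
          cases hmm : PySem.List.min? (pvHitsOf ((p, kws) :: rest) api) (fun x => x) with
          | none =>
              exact absurd ((PySem.List.min?_eq_none_iff _ _).mp hmm ▸ hpmem) (by simp)
          | some m => exact ⟨m, rfl⟩
        rw [hm]
        have h1 : m ∈ pvHitsOf ((p, kws) :: rest) api := PySem.List.min?_mem hm
        have h2 : p ≤ m := hge m h1
        have h3 : m ≤ p := PySem.List.min?_isMin hm p hpmem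
        show p = m
        omega
      · rw [if_neg hany]
        have hfil : kws.filter (fun kw => PySem.Str.isIn kw api) = [] := by
          rw [List.filter_eq_nil_iff]
          intro kw hkw
          exact fun hin => hany (List.any_eq_true.mpr ⟨kw, hkw, hin⟩)
        have : pvHitsOf ((p, kws) :: rest) api = pvHitsOf rest api := by
          unfold pvHitsOf
          simp only [List.flatMap_cons]
          rw [hfil]
          rfl
        rw [this, ih hpw']

theorem pvKeyAB (api : String) : pvGetPriorityA api = pvPrioB api := by
  unfold pvGetPriorityA pvPrioB
  rw [pvItemsA, pvHitsB, pvLoop_eq_min api pvGroups (by decide)]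

theorem pvKey_mem (api : String) : pvGetPriorityA api ∈ ([1, 2, 3, 4, 5, 6, 7] : List Int) := by
  unfold pvGetPriorityA
  rw [pvItemsA]
  unfold pvGroups
  simp only [pvGetPriorityLoopA]
  split_ifs <;> decide

-- insertBy skips a prefix it is not 'before'
theorem pvInsertBy_append_left {α : Type} (before : α → α → Bool) (x : α) (as bs : List α)
    (h : ∀ a ∈ as, before x a = false) :
    PySem.List.insertBy before x (as ++ bs) = as ++ PySem.List.insertBy before x bs := by
  induction as with
  | nil => simp
  | cons a as ih =>
      have ha : before x a = false := h a (by simp)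
      simp only [List.cons_append, PySem.List.insertBy, ha]
      simp [ih (fun a ha' => h a (by simp [ha']))]

-- insertBy puts x at the front when it is 'before' everything
theorem pvInsertBy_front {α : Type} (before : α → α → Bool) (x : α) (ys : List α)
    (h : ∀ y ∈ ys, before x y = true) :
    PySem.List.insertBy before x ys = x :: ys := by
  cases ys with
  | nil => rfl
  | cons y ys => simp [PySem.List.insertBy, h y (by simp)]

theorem pvFlatMap_congr {α β : Type} (ps : List α) (f g : α → List β)
    (h : ∀ p ∈ ps, f p = g p) : ps.flatMap f = ps.flatMap g := by
  induction ps with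
  | nil => rfl
  | cons p ps ih =>
      simp only [List.flatMap_cons, h p (by simp), ih (fun q hq => h q (by simp [hq]))]

-- inserting x into the concatenation of key-homogeneous buckets appends it to its own bucket
theorem pvInsertBy_flatMap (key : String → Int) (x : String) :
    ∀ (ps : List Int) (g : Int → List String), ps.Pairwise (· < ·) → key x ∈ ps →
      (∀ p ∈ ps, ∀ y ∈ g p, key y = p) →
      PySem.List.insertBy (fun a b => decide (key a < key b)) x (ps.flatMap g)
        = ps.flatMap (fun p => g p ++ if key x = p then [x] else []) := by
  intro ps
  induction ps with
  | nil => intro g _ hx _; simp at hx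
  | cons p ps ih =>
      intro g hpw hx hg
      have hpw' := (List.pairwise_cons.mp hpw).2
      have hlt : ∀ q ∈ ps, p < q := (List.pairwise_cons.mp hpw).1
      simp only [List.flatMap_cons]
      by_cases hxp : key x = p
      · have h1 : ∀ a ∈ g p, (fun a b => decide (key a < key b)) x a = false := by
          intro a ha
          have := hg p (by simp) a ha
          simp [this, hxp]
        have h2 : ∀ y ∈ ps.flatMap g, (fun a b => decide (key a < key b)) x y = true := by
          intro y hy
          obtain ⟨q, hq, hyq⟩ := List.mem_flatMap.mp hy
          have := hg q (by simp [hq]) y hyq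
          have := hlt q hq
          simp_all
        rw [pvInsertBy_append_left _ _ _ _ h1, pvInsertBy_front _ _ _ h2]
        have h3 : ps.flatMap (fun q => g q ++ if key x = q then [x] else []) = ps.flatMap g := by
          apply pvFlatMap_congr
          intro q hq
          have : key x ≠ q := by have := hlt q hq; omega
          simp [this]
        rw [h3, if_pos hxp]
        simp
      · have hx' : key x ∈ ps := (List.mem_cons.mp hx).resolve_left hxp
        have h1 : ∀ a ∈ g p, (fun a b => decide (key a < key b)) x a = false := by
          intro a ha
          have hka := hg p (by simp) a ha
          have := hlt _ hx'
          simp only [decide_eq_false_iff_not, hka]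
          omega
        rw [pvInsertBy_append_left _ _ _ _ h1,
            ih g hpw' hx' (fun q hq y hy => hg q (by simp [hq]) y hy), if_neg hxp]
        simp

-- A's stable sort over keys in 1..7 is the concatenation of the filters by key
theorem pvSorted_eq_buckets (key : String → Int)
    (hmem : ∀ a, key a ∈ ([1, 2, 3, 4, 5, 6, 7] : List Int)) (xs : List String) :
    PySem.List.sorted xs key false
      = ([1, 2, 3, 4, 5, 6, 7] : List Int).flatMap (fun p => xs.filter (fun a => key a == p)) := by
  rw [PySem.List.sorted_eq_foldl_insertBy]
  induction xs using List.reverseRecOn with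
  | nil => simp
  | append_singleton xs x ih =>
      rw [List.foldl_append]
      simp only [List.foldl_cons, List.foldl_nil]
      rw [ih]
      rw [pvInsertBy_flatMap key x _ _ (by decide) (hmem x)
          (fun p hp y hy => by
            have := List.of_mem_filter hy
            simpa using this)]
      apply pvFlatMap_congr
      intro p hp
      rw [List.filter_append]
      congr 1
      by_cases h : key x = p <;> simp [h]

theorem pvAlt_eq_buckets (xs : List String) :
    suggest_init_order_alt xs
      = ([1, 2, 3, 4, 5, 6, 7] : List Int).flatMap (fun p => xs.filter (fun a => pvPrioB a == p)) := by
  unfold suggest_init_order_alt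
  rw [PySem.List.foldl_append_eq_flatMap]
  rfl

-- ===== VERDICT (by name: the statement is the Claim_ definition above) =====
theorem suggest_init_order_spec : Claim_equal_suggest_init_order := by
  intro xs _
  show suggest_init_order xs = suggest_init_order_alt xs
  unfold suggest_init_order
  rw [pvSorted_eq_buckets pvGetPriorityA pvKey_mem, pvAlt_eq_buckets]
  exact pvFlatMap_congr _ _ _ (fun p _ => by
    apply List.filter_congr
    intro a _
    rw [pvKeyAB])
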